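-- pv_equiv track=rewrite | github.com/xy1ab/poly2vec_mae | mae_pretrain/scripts/run_viz_polygon_triangulation.py | _select_overall_failure_stage
-- ===== SOURCE A (Python) =====
-- from typing import Any
--
-- def _select_overall_failure_stage(candidate_results: list[dict[str, Any]]) -> str | None:
--     """Select one representative failure stage for the full sample."""
--     priority = [
--         "triangulate_timeout",
--         "triangulate_crash",
--         "triangulate_error",
--         "all_triangles_filtered",
--         "triangulate_empty",
--         "normalize_failed",
--     ]
--     observed = [result.get("failure_stage") for result in candidate_results if result.get("failure_stage")]
--     for stage in priority:
--         if stage in observed: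
--             return stage
--     return observed[0] if observed else None
-- ===== SOURCE B (Python) =====
-- def _select_overall_failure_stage(candidate_results):
--     """Select one representative failure stage for the full sample."""
--     priority = [
--         "triangulate_timeout",
--         "triangulate_crash",
--         "triangulate_error",
--         "all_triangles_filtered",
--         "triangulate_empty",
--         "normalize_failed",
--     ]
--     prio_index = {stage: i for i, stage in enumerate(priority)}
--     best = len(priority)
--     first_seen = None
--     for result in candidate_results:
--         stage = result.get("failure_stage")
--         if stage:
--             if first_seen is None:
--                 first_seen = stage
--             i = prio_index.get(stage)
--             if i is not None and i < best:
--                 best = i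
--     return priority[best] if best < len(priority) else first_seen
-- ===== Notes on version B (the rewrite author's own statement) =====
-- stated objective: simpler
-- what changed: Replaced A's two-phase scheme (build an 'observed' list, then scan the priority list testing membership with 'in') by a single indexed pass: a stage->index dict built once, one loop over candidate_results tracking the minimal priority index and the first truthy stage, no intermediate list and no membership scans.
import Mathlib
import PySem

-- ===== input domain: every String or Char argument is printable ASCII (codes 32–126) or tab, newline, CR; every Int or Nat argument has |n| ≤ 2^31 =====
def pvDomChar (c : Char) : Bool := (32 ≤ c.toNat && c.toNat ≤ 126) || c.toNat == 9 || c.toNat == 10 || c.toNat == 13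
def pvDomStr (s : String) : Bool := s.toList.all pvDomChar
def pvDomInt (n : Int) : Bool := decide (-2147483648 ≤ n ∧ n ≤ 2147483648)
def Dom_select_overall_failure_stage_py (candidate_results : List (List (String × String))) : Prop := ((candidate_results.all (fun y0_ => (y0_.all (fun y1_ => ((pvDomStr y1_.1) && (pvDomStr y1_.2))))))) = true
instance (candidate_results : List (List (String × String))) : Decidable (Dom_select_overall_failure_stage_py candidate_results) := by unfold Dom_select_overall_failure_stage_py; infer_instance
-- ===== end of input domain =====

-- B replaces A's observed-list + priority membership scan by one indexed pass with a
-- stage->index dict, tracking the minimal priority index and the first truthy stage (simpler).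


-- ===== PORT A =====
def pvPriority : List String :=
  ["triangulate_timeout", "triangulate_crash", "triangulate_error",
   "all_triangles_filtered", "triangulate_empty", "normalize_failed"]

-- body of A's list comprehension: append result.get("failure_stage") when truthy
def pvObservedStep (acc : List String) (r : List (String × String)) : List String :=
  match (PySem.Dict.ofList r).get? "failure_stage" with
  | none => acc
  | some s => if s ≠ "" then acc ++ [s] else acc

def select_overall_failure_stage_py (candidate_results : List (List (String × String))) : Option String :=
  let observed : List String := candidate_results.foldl pvObservedStep []
  match pvPriority.find? (fun stage => observed.contains stage) with
  | some stage => some stage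
  | none => observed.head?

-- ===== PORT B =====
def pvPrioIndex : PySem.Dict String Int :=
  (PySem.List.enumerate pvPriority 0).foldl (fun d p => d.insert p.2 p.1) PySem.Dict.empty

-- body of B's single loop over candidate_results: state = (best, first_seen)
def pvScanStep (acc : Int × Option String) (r : List (String × String)) : Int × Option String :=
  match (PySem.Dict.ofList r).get? "failure_stage" with
  | none => acc
  | some stage =>
    if stage ≠ "" then
      let fs := match acc.2 with | none => some stage | some x => some x
      match pvPrioIndex.get? stage with
      | some i => if i < acc.1 then (i, fs) else (acc.1, fs)
      | none => (acc.1, fs)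
    else acc

def select_overall_failure_stage_py_alt (candidate_results : List (List (String × String))) : Option String :=
  let st : Int × Option String := candidate_results.foldl pvScanStep (6, none)
  if st.1 < 6 then PySem.List.pyGet? pvPriority st.1 else st.2

-- ===== PRECONDITION & SPEC =====
def Spec_select_overall_failure_stage_py (candidate_results : List (List (String × String))) (out : Option String) : Prop := out = select_overall_failure_stage_py_alt candidate_results
instance (candidate_results : List (List (String × String))) (out : Option String) : Decidable (Spec_select_overall_failure_stage_py candidate_results out) := by unfold Spec_select_overall_failure_stage_py; infer_instance

-- ===== CLAIM (what is proved, stated in full; the proofs are below) =====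
def Claim_equal_select_overall_failure_stage_py : Prop := ∀ (candidate_results : List (List (String × String))), Dom_select_overall_failure_stage_py candidate_results → Spec_select_overall_failure_stage_py candidate_results (select_overall_failure_stage_py candidate_results)

-- ===== LEMMAS AND PROOFS =====

-- the truthy failure stage extracted from one result, shared characterisation of both loops
def pvStage (r : List (String × String)) : Option String :=
  match (PySem.Dict.ofList r).get? "failure_stage" with
  | none => none
  | some s => if s ≠ "" then some s else none

lemma pvObservedStep_char (acc : List String) (r : List (String × String)) :
    pvObservedStep acc r = acc ++ (pvStage r).toList := by
  unfold pvObservedStep pvStage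
  cases h : (PySem.Dict.ofList r).get? "failure_stage" with
  | none => simp
  | some s => by_cases hs : s = "" <;> simp [hs]

lemma obsA (cr : List (List (String × String))) : ∀ acc : List String,
    cr.foldl pvObservedStep acc = acc ++ cr.filterMap pvStage := by
  induction cr with
  | nil => intro acc; simp
  | cons r t ih =>
    intro acc
    rw [List.foldl_cons, ih, pvObservedStep_char, List.filterMap_cons]
    cases pvStage r <;> simp

-- priority index of a stage, with 7 for "not a priority stage"
def pvIdx (s : String) : Int := (pvPrioIndex.get? s).getD 7

-- minimal priority index occurring in a list of stages (7 if none)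
def pvM : List String → Int
  | [] => 7
  | s :: t => min (pvIdx s) (pvM t)

lemma pvScanStep_char (acc : Int × Option String) (r : List (String × String)) (hb : acc.1 ≤ 7) :
    pvScanStep acc r = match pvStage r with
      | none => acc
      | some s => (min acc.1 (pvIdx s), acc.2.or (some s)) := by
  unfold pvScanStep pvStage
  cases h : (PySem.Dict.ofList r).get? "failure_stage" with
  | none => simp
  | some s =>
    by_cases hs : s = ""
    · simp [hs]
    · have hfs : (match acc.2 with | none => some s | some x => some x) = acc.2.or (some s) := by
        cases acc.2 <;> rfl
      simp only [hs, ne_eq, not_false_iff, if_true, hfs]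
      cases hi : pvPrioIndex.get? s with
      | none =>
        simp only [pvIdx, hi, Option.getD_none]
        have : min acc.1 7 = acc.1 := by omega
        simp [this]
      | some i =>
        simp only [pvIdx, hi, Option.getD_some]
        by_cases hlt : i < acc.1
        · simp [hlt]; omega
        · simp [hlt]; omega

lemma foldB (cr : List (List (String × String))) : ∀ (b : Int) (fs : Option String), b ≤ 7 →
    cr.foldl pvScanStep (b, fs)
      = (min b (pvM (cr.filterMap pvStage)), fs.or (cr.filterMap pvStage).head?) := by
  induction cr with
  | nil => intro b fs hb; simp [pvM]; omega
  | cons r t ih =>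
    intro b fs hb
    rw [List.foldl_cons, pvScanStep_char (b, fs) r hb, List.filterMap_cons]
    cases h : pvStage r with
    | none => simp [ih b fs hb]
    | some s =>
      simp only
      rw [ih (min b (pvIdx s)) (fs.or (some s)) (by omega)]
      refine Prod.ext ?_ ?_
      · simp only [pvM]; omega
      · simp only [List.head?_cons, Option.or_assoc]
        cases fs <;> rfl

-- characterisation of pvM by memberships of the six priority stages
lemma pvIdx_of_not_mem (s : String) (h : s ∉ pvPriority) : pvIdx s = 7 := by
  simp only [pvPriority, List.mem_cons, not_or, List.not_mem_nil, not_false_iff, and_true] at h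
  obtain ⟨h0, h1, h2, h3, h4, h5⟩ := h
  rw [pvIdx, show pvPrioIndex = PySem.Dict.mk [("triangulate_timeout", 0), ("triangulate_crash", 1),
      ("triangulate_error", 2), ("all_triangles_filtered", 3), ("triangulate_empty", 4),
      ("normalize_failed", 5)] from by decide]
  simp [beq_iff_eq, Ne.symm h0, Ne.symm h1, Ne.symm h2, Ne.symm h3,
    Ne.symm h4, Ne.symm h5, PySem.Dict.get?]

lemma pvM_char (obs : List String) :
    pvM obs =
      if "triangulate_timeout" ∈ obs then 0
      else if "triangulate_crash" ∈ obs then 1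
      else if "triangulate_error" ∈ obs then 2
      else if "all_triangles_filtered" ∈ obs then 3
      else if "triangulate_empty" ∈ obs then 4
      else if "normalize_failed" ∈ obs then 5
      else 7 := by
  induction obs with
  | nil => simp [pvM]
  | cons s t ih =>
    by_cases hmem : s ∈ pvPriority
    · simp only [pvPriority, List.mem_cons, List.not_mem_nil, or_false] at hmem
      rcases hmem with rfl | rfl | rfl | rfl | rfl | rfl <;>
        (simp only [pvM, ih, List.mem_cons]
         simp only [show pvIdx "triangulate_timeout" = 0 from by decide,
             show pvIdx "triangulate_crash" = 1 from by decide,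
             show pvIdx "triangulate_error" = 2 from by decide,
             show pvIdx "all_triangles_filtered" = 3 from by decide,
             show pvIdx "triangulate_empty" = 4 from by decide,
             show pvIdx "normalize_failed" = 5 from by decide]
         simp
         split_ifs <;> omega)
    · rw [pvM, ih, pvIdx_of_not_mem s hmem]
      simp only [pvPriority, List.mem_cons, not_or, List.not_mem_nil, not_false_iff, and_true] at hmem
      obtain ⟨h0, h1, h2, h3, h4, h5⟩ := hmem
      simp only [List.mem_cons, Ne.symm h0, Ne.symm h1, Ne.symm h2, Ne.symm h3, Ne.symm h4,
        Ne.symm h5, false_or]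
      split_ifs <;> omega

-- ===== VERDICT (by name: the statement is the Claim_ definition above) =====
theorem select_overall_failure_stage_py_spec : Claim_equal_select_overall_failure_stage_py := by
  intro cr _
  unfold Spec_select_overall_failure_stage_py select_overall_failure_stage_py select_overall_failure_stage_py_alt
  rw [obsA, foldB cr 6 none (by omega)]
  simp only [List.nil_append]
  rw [pvM_char]
  generalize cr.filterMap pvStage = obs
  by_cases h0 : "triangulate_timeout" ∈ obs <;>
  by_cases h1 : "triangulate_crash" ∈ obs <;>
  by_cases h2 : "triangulate_error" ∈ obs <;>
  by_cases h3 : "all_triangles_filtered" ∈ obs <;>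
  by_cases h4 : "triangulate_empty" ∈ obs <;>
  by_cases h5 : "normalize_failed" ∈ obs <;>
  simp [pvPriority, List.find?, h0, h1, h2, h3, h4, h5]
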